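-- pv_equiv track=rewrite | github.com/ds-souvik/Revise_Python_2025 | 04_loops/14_parcel_scanning_system.py | scan_parcels
-- ===== SOURCE A (Python) =====
-- def scan_parcels(parcel_codes: list[str]) -> list[str]:
--     # Write your code below this line
--     message = []
--     for item in parcel_codes:
--         if item == "DAMAGED":
--             message.append(f"Skipped damaged parcel")
--             continue
--         elif item == "STOP":
--             message.append(f"Critical error: Stopping scan")
--             break
--         else:
--             message.append(f"Scanned parcel: {item}")
--
--     else:
--         message.append(f"All parcels scanned successfully")
--
--     return message
-- ===== SOURCE B (Python) =====
-- def scan_parcels(parcel_codes: list[str]) -> list[str]: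
--     def msg(c):
--         return "Skipped damaged parcel" if c == "DAMAGED" else f"Scanned parcel: {c}"
--     if "STOP" in parcel_codes:
--         prefix = parcel_codes[:parcel_codes.index("STOP")]
--         return [msg(c) for c in prefix] + ["Critical error: Stopping scan"]
--     return [msg(c) for c in parcel_codes] + ["All parcels scanned successfully"]
-- ===== Notes on version B (the rewrite author's own statement) =====
-- stated objective: idiomatic
-- what changed: Replaced the single break/for-else loop with an index-first two-phase construction: test 'STOP' in the list, slice the prefix before the first STOP, map a message comprehension over it, and append the terminal message.
import Mathlib
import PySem

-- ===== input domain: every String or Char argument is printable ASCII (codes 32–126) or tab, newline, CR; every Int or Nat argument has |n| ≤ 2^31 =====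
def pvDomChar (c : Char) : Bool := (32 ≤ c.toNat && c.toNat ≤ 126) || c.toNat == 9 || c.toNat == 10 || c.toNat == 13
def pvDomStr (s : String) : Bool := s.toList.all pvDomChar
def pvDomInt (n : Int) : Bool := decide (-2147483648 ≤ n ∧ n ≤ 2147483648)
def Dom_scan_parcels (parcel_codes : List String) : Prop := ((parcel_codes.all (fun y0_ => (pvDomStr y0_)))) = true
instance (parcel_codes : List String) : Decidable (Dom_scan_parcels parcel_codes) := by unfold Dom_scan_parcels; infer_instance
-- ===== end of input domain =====

-- B replaces A's break/for-else loop by an index-first two-phase construction (membership test,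
-- slice before the first STOP, message comprehension, terminal message appended): same values, idiomatic shape.

-- ===== PORT A =====
-- A's for-loop with continue/break and a for-else clause, as structural recursion:
-- the 'else' branch (no break) is the [] case; 'break' stops the recursion.
def scan_parcels (parcel_codes : List String) : List String :=
  match parcel_codes with
  | [] => ["All parcels scanned successfully"]
  | item :: rest =>
    if item = "DAMAGED" then "Skipped damaged parcel" :: scan_parcels rest
    else if item = "STOP" then ["Critical error: Stopping scan"]
    else ("Scanned parcel: " ++ item) :: scan_parcels rest

-- ===== PORT B =====
def pvMsg (c : String) : String :=
  if c = "DAMAGED" then "Skipped damaged parcel" else "Scanned parcel: " ++ c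

def scan_parcels_alt (parcel_codes : List String) : List String :=
  if "STOP" ∈ parcel_codes then
    (parcel_codes.take (parcel_codes.idxOf "STOP")).map pvMsg ++ ["Critical error: Stopping scan"]
  else
    parcel_codes.map pvMsg ++ ["All parcels scanned successfully"]

-- ===== PRECONDITION & SPEC =====
def Spec_scan_parcels (parcel_codes : List String) (out : List String) : Prop := out = scan_parcels_alt parcel_codes
instance (parcel_codes : List String) (out : List String) : Decidable (Spec_scan_parcels parcel_codes out) := by unfold Spec_scan_parcels; infer_instance

-- ===== CLAIM (what is proved, stated in full; the proofs are below) =====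
def Claim_equal_scan_parcels : Prop := ∀ (parcel_codes : List String), Dom_scan_parcels parcel_codes → Spec_scan_parcels parcel_codes (scan_parcels parcel_codes)

-- ===== LEMMAS AND PROOFS =====
theorem scan_parcels_eq_alt (parcel_codes : List String) :
    scan_parcels parcel_codes = scan_parcels_alt parcel_codes := by
  induction parcel_codes with
  | nil => simp [scan_parcels, scan_parcels_alt]
  | cons item rest ih =>
    by_cases hstop : item = "STOP"
    · subst hstop
      simp [scan_parcels, scan_parcels_alt]
    · have hstop' : ¬ "STOP" = item := fun h => hstop h.symm
      by_cases hdam : item = "DAMAGED"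
      · subst hdam
        simp_all [scan_parcels, scan_parcels_alt, pvMsg]
        by_cases hm : "STOP" ∈ rest <;> simp_all
      · simp_all [scan_parcels, scan_parcels_alt, pvMsg]
        by_cases hm : "STOP" ∈ rest <;> simp_all

-- ===== VERDICT (by name: the statement is the Claim_ definition above) =====
theorem scan_parcels_spec : Claim_equal_scan_parcels := by
  intro parcel_codes _
  unfold Spec_scan_parcels
  exact scan_parcels_eq_alt parcel_codes
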